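-- pv_equiv track=rewrite | github.com/naturalnum/openclaw | skills/technical-report-docx/scripts/prepare_docx_generation.py | pick_body
-- ===== SOURCE A (Python) =====
-- def pick_body(style_profiles: dict):
--     ranked = sorted(
--         style_profiles.items(),
--         key=lambda item: item[1].get("paragraphs", 0),
--         reverse=True,
--     )
--     for style_name, _profile in ranked:
--         lowered = style_name.strip().lower()
--         if any(bad in lowered for bad in ["heading", "title", "toc", "header", "footer", "caption"]):
--             continue
--         return style_name
--     return ranked[0][0] if ranked else None
-- ===== SOURCE B (Python) =====
-- def pick_body(style_profiles: dict):
--     # Single pass keeping the best non-excluded style and best overall (no sort).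
--     if not style_profiles:
--         return None
--     bad = ["heading", "title", "toc", "header", "footer", "caption"]
--     best_good = None
--     best_all = None
--     for name, profile in style_profiles.items():
--         k = profile.get("paragraphs", 0)
--         if best_all is None or k > best_all[1]:
--             best_all = (name, k)
--         lowered = name.strip().lower()
--         if any(b in lowered for b in bad):
--             continue
--         if best_good is None or k > best_good[1]:
--             best_good = (name, k)
--     if best_good is not None:
--         return best_good[0]
--     return best_all[0]
-- ===== Notes on version B (the rewrite author's own statement) =====
-- stated objective: alternative
-- what changed: Replaced A's sort-of-all-items-then-scan by a single pass over the dict that keeps the best (first strictly-maximal by paragraph count) non-excluded style and the best overall style as running accumulators.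
import Mathlib
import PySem

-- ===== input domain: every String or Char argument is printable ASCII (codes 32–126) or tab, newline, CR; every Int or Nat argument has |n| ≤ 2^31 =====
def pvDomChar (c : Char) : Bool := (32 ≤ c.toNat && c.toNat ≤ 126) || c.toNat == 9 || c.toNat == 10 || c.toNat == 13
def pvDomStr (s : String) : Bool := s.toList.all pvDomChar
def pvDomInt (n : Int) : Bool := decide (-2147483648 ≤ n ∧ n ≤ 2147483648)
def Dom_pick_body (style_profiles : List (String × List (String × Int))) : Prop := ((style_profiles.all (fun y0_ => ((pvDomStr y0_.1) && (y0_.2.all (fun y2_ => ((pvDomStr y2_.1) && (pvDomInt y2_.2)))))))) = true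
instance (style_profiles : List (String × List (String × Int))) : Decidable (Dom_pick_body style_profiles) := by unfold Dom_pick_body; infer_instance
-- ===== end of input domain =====

-- B replaces A's sort-then-scan by a single pass keeping the best candidates; return value only.

-- shared helpers (identical code in both Pythons): the paragraph-count key and the excluded-name test
def pvKey (p : String × List (String × Int)) : Int :=
  (PySem.Dict.mk p.2).getD "paragraphs" 0

def pvBad (name : String) : Bool :=
  (["heading", "title", "toc", "header", "footer", "caption"]).any
    (fun b => PySem.Str.isIn b (PySem.Str.lower (PySem.Str.strip name)))

-- ===== PORT A =====
def pick_body (style_profiles : List (String × List (String × Int))) : Option String :=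
  let ranked := PySem.List.sorted style_profiles pvKey true
  match ranked.find? (fun p => !pvBad p.1) with
  | some p => some p.1
  | none =>
    match ranked with
    | [] => none
    | p :: _ => some p.1

-- ===== PORT B =====
-- the loop body of Source B: update (best_good, best_all) with one item
def pvStep (acc : Option (String × Int) × Option (String × Int))
    (x : String × List (String × Int)) : Option (String × Int) × Option (String × Int) :=
  let k := pvKey x
  let bestAll :=
    match acc.2 with
    | none => some (x.1, k)
    | some m => if m.2 < k then some (x.1, k) else some m
  let bestGood :=
    if pvBad x.1 then acc.1
    else
      match acc.1 with
      | none => some (x.1, k)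
      | some m => if m.2 < k then some (x.1, k) else some m
  (bestGood, bestAll)

def pick_body_alt (style_profiles : List (String × List (String × Int))) : Option String :=
  if style_profiles = [] then none
  else
    let st := style_profiles.foldl pvStep (none, none)
    match st.1 with
    | some m => some m.1
    | none => st.2.map (·.1)

-- ===== PRECONDITION & SPEC =====
def Spec_pick_body (style_profiles : List (String × List (String × Int))) (out : Option String) : Prop := out = pick_body_alt style_profiles
instance (style_profiles : List (String × List (String × Int))) (out : Option String) : Decidable (Spec_pick_body style_profiles out) := by unfold Spec_pick_body; infer_instance

-- ===== CLAIM (what is proved, stated in full; the proofs are below) =====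
def Claim_equal_pick_body : Prop := ∀ (style_profiles : List (String × List (String × Int))), Dom_pick_body style_profiles → Spec_pick_body style_profiles (pick_body style_profiles)

-- ===== LEMMAS AND PROOFS =====

-- the "before" test of the reverse stable insertion sort, at our key
def pvBf (a b : String × List (String × Int)) : Bool := decide (pvKey b < pvKey a)

-- one step of "first element with maximal key among those satisfying p"
def pvStepF (p : (String × List (String × Int)) → Bool)
    (b : Option (String × List (String × Int))) (x : String × List (String × Int)) :
    Option (String × List (String × Int)) :=
  if p x then
    match b with
    | none => some x
    | some m => if pvKey m < pvKey x then some x else some m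
  else b

def pvDesc (l : List (String × List (String × Int))) : Prop :=
  l.Pairwise (fun a b => pvKey b ≤ pvKey a)

lemma pvPairwise_insertBy (x : String × List (String × Int))
    (acc : List (String × List (String × Int))) (h : pvDesc acc) :
    pvDesc (PySem.List.insertBy pvBf x acc) := by
  induction acc with
  | nil => simp [PySem.List.insertBy, pvDesc]
  | cons y ys ih =>
    rcases (List.pairwise_cons.mp h) with ⟨hy, hys⟩
    by_cases hb : pvKey y < pvKey x
    · have : PySem.List.insertBy pvBf x (y :: ys) = x :: y :: ys := by
        simp [PySem.List.insertBy, pvBf, hb]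
      rw [this]
      refine List.pairwise_cons.mpr ⟨?_, h⟩
      intro z hz
      rcases List.mem_cons.mp hz with hz | hz
      · subst hz; exact le_of_lt hb
      · exact le_trans (hy z hz) (le_of_lt hb)
    · have : PySem.List.insertBy pvBf x (y :: ys) = y :: PySem.List.insertBy pvBf x ys := by
        simp [PySem.List.insertBy, pvBf, hb]
      rw [this]
      refine List.pairwise_cons.mpr ⟨?_, ih hys⟩
      intro z hz
      rcases (PySem.List.mem_insertBy pvBf x z ys).mp hz with hz | hz
      · subst hz; exact le_of_not_gt hb
      · exact hy z hz

lemma pvFind_insertBy (p : (String × List (String × Int)) → Bool)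
    (x : String × List (String × Int))
    (acc : List (String × List (String × Int))) (h : pvDesc acc) :
    (PySem.List.insertBy pvBf x acc).find? p = pvStepF p (acc.find? p) x := by
  induction acc with
  | nil =>
    by_cases hp : p x <;> simp [PySem.List.insertBy, pvStepF, hp]
  | cons y ys ih =>
    rcases (List.pairwise_cons.mp h) with ⟨hy, hys⟩
    by_cases hb : pvKey y < pvKey x
    · have hins : PySem.List.insertBy pvBf x (y :: ys) = x :: y :: ys := by
        simp [PySem.List.insertBy, pvBf, hb]
      rw [hins]
      by_cases hp : p x
      · rcases hm : (y :: ys).find? p with _ | m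
        · simp [hp, pvStepF]
        · have hmem : m ∈ y :: ys := List.mem_of_find?_eq_some hm
          have hmk : pvKey m < pvKey x := by
            rcases List.mem_cons.mp hmem with hmeq | hmem
            · subst hmeq; exact hb
            · exact lt_of_le_of_lt (hy m hmem) hb
          simp [hp, pvStepF, hmk]
      · simp [List.find?_cons, hp, pvStepF]
    · have hins : PySem.List.insertBy pvBf x (y :: ys) = y :: PySem.List.insertBy pvBf x ys := by
        simp [PySem.List.insertBy, pvBf, hb]
      rw [hins]
      by_cases hpy : p y
      · have hylt : ¬ pvKey y < pvKey x := hb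
        by_cases hp : p x <;> simp [hpy, pvStepF, hp, hylt]
      · simp [hpy, ih hys]

lemma pvFold_insertBy (p : (String × List (String × Int)) → Bool)
    (xs : List (String × List (String × Int))) :
    ∀ (acc : List (String × List (String × Int))), pvDesc acc →
      (xs.foldl (fun a x => PySem.List.insertBy pvBf x a) acc).find? p
        = xs.foldl (pvStepF p) (acc.find? p) := by
  induction xs with
  | nil => intro acc _; simp
  | cons x xs ih =>
    intro acc hacc
    simp only [List.foldl_cons]
    rw [ih _ (pvPairwise_insertBy x acc hacc), pvFind_insertBy p x acc hacc]

lemma pvMain (p : (String × List (String × Int)) → Bool)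
    (xs : List (String × List (String × Int))) :
    (PySem.List.sorted xs pvKey true).find? p = xs.foldl (pvStepF p) none := by
  have h := PySem.List.sorted_rev_eq_foldl_insertBy xs pvKey
  have hbf : (fun (acc : List (String × List (String × Int))) x =>
      PySem.List.insertBy (fun a b => decide (pvKey b < pvKey a)) x acc)
      = (fun acc x => PySem.List.insertBy pvBf x acc) := rfl
  rw [h, hbf, pvFold_insertBy p xs [] (by simp [pvDesc])]
  rfl

def pvTag (x : String × List (String × Int)) : String × Int := (x.1, pvKey x)

lemma pvFoldB (xs : List (String × List (String × Int))) :
    ∀ (g h : Option (String × List (String × Int))),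
      xs.foldl pvStep (g.map pvTag, h.map pvTag)
        = ((xs.foldl (pvStepF (fun x => !pvBad x.1)) g).map pvTag,
           (xs.foldl (pvStepF (fun _ => true)) h).map pvTag) := by
  induction xs with
  | nil => intro g h; simp
  | cons x xs ih =>
    intro g h
    have hstep : pvStep (g.map pvTag, h.map pvTag) x
        = ((pvStepF (fun x => !pvBad x.1) g x).map pvTag,
           (pvStepF (fun _ => true) h x).map pvTag) := by
      rcases g with _ | m <;> rcases h with _ | m' <;>
        by_cases hb : pvBad x.1 <;>
        simp [pvStep, pvStepF, pvTag, hb] <;> split_ifs <;> simp_all [pvTag]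
    simp only [List.foldl_cons, hstep]
    exact ih _ _

lemma pvFind_true_eq_head (l : List (String × List (String × Int))) :
    l.find? (fun _ => true) = l.head? := by
  cases l with
  | nil => rfl
  | cons a t => simp

-- ===== VERDICT (by name: the statement is the Claim_ definition above) =====
theorem pick_body_spec : Claim_equal_pick_body := by
  intro xs _hdom
  unfold Spec_pick_body
  rcases hxs : xs with _ | ⟨a, l⟩
  · rfl
  rw [← hxs]
  have hne : xs ≠ [] := by rw [hxs]; exact List.cons_ne_nil a l
  have hG := pvMain (fun x => !pvBad x.1) xs
  have hA := pvMain (fun _ => true) xs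
  have hfold := pvFoldB xs none none
  simp only [Option.map_none] at hfold
  unfold pick_body pick_body_alt
  simp only [if_neg hne, hfold, hG]
  rcases hGv : xs.foldl (pvStepF (fun x => !pvBad x.1)) none with _ | m
  · -- no non-excluded style: A falls back to the head of the ranking, B to best_all
    have hrne : PySem.List.sorted xs pvKey true ≠ [] := by
      rw [Ne, PySem.List.sorted_eq_nil_iff]; exact hne
    rcases hr : PySem.List.sorted xs pvKey true with _ | ⟨p, t⟩
    · exact absurd hr hrne
    have hhead : xs.foldl (pvStepF (fun _ => true)) none = some p := by
      rw [← hA, hr, pvFind_true_eq_head]; rfl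
    simp [hhead, pvTag]
  · simp [pvTag]
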